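-- pv_equiv track=rewrite | github.com/namel3ss-Ai/namel3ss | src/namel3ss/rag/retrieval/highlight_resolver.py | _collapsed_text_with_offsets
-- ===== SOURCE A (Python) =====
-- def _collapsed_text_with_offsets(text: str) -> tuple[str, list[int]]:
--     chars: list[str] = []
--     offsets: list[int] = []
--     in_space = False
--     for index, char in enumerate(text):
--         if char.isspace():
--             if in_space:
--                 continue
--             chars.append(" ")
--             offsets.append(index)
--             in_space = True
--             continue
--         chars.append(char.lower())
--         offsets.append(index)
--         in_space = False
--     raw = "".join(chars)
--     if not raw.strip():
--         return "", []
--     left_trim = 0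
--     right_trim = len(raw)
--     while left_trim < right_trim and raw[left_trim] == " ":
--         left_trim += 1
--     while right_trim > left_trim and raw[right_trim - 1] == " ":
--         right_trim -= 1
--     return raw[left_trim:right_trim], offsets[left_trim:right_trim]
-- ===== SOURCE B (Python) =====
-- def _collapsed_text_with_offsets(text: str) -> tuple[str, list[int]]:
--     # Tokenize into maximal non-whitespace runs ("words") with their start offsets,
--     # then join the lowered words with single spaces whose offset is the previous
--     # word's end; no trimming pass is needed because separators only ever appear
--     # between two words.
--     n = len(text)
--     words = []  # (start, chunk)
--     i = 0
--     while i < n: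
--         if text[i].isspace():
--             i += 1
--         else:
--             j = i + 1
--             while j < n and not text[j].isspace():
--                 j += 1
--             words.append((i, text[i:j]))
--             i = j
--     if not words:
--         return "", []
--     pairs = []  # (char, offset)
--     prev_end = None
--     for start, w in words:
--         if prev_end is not None:
--             pairs.append((" ", prev_end))
--         end = start + len(w)
--         pairs.extend(zip(w.lower(), range(start, end)))
--         prev_end = end
--     return "".join(c for c, _ in pairs), [o for _, o in pairs]
-- ===== Notes on version B (the rewrite author's own statement) =====
-- stated objective: alternative
-- what changed: Replaces A's single character-by-character state machine (in_space flag) plus a separate post-hoc left/right trim pass by a two-phase tokenizer: split the text into maximal non-whitespace words with their start offsets, then join the lowered words with single separator spaces whose offset is the previous word's end, so no trimming is ever needed.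
import Mathlib
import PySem

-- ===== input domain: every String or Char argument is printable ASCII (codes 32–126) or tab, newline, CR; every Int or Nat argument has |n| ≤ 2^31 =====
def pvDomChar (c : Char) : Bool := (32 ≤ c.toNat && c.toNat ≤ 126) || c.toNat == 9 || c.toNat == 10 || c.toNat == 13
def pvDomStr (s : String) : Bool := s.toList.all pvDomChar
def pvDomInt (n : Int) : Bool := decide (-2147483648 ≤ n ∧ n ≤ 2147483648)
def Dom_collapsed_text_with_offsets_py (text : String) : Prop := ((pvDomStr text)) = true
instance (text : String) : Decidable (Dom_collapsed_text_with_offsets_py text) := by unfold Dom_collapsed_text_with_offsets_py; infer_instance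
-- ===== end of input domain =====

-- B replaces A's in_space state machine + trim pass by word tokenization and joining; alternative decomposition, same cost.

-- ===== PORT A =====
-- the for-loop over enumerate(text): chars/offsets accumulated in step with the in_space flag
def pvALoop (cs : List Char) (k : Int) (s : Bool) : List Char × List Int :=
  match cs with
  | [] => ([], [])
  | c :: rest =>
    if PySem.Chars.isspace c then
      if s then pvALoop rest (k + 1) s
      else
        let r := pvALoop rest (k + 1) true
        (' ' :: r.1, k :: r.2)
    else
      let r := pvALoop rest (k + 1) false
      (PySem.Chars.lowerChar c :: r.1, k :: r.2)

-- Python's `while left_trim < right_trim and raw[left_trim] == " "`; raw[left_trim] is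
-- always in range here (left_trim < right_trim ≤ len raw), so getD is exact.
def pvWhileLeft (raw : List Char) (rt lt : Nat) : Nat :=
  if lt < rt ∧ raw.getD lt ' ' = ' ' then pvWhileLeft raw rt (lt + 1) else lt
termination_by rt - lt
decreasing_by omega

-- Python's `while right_trim > left_trim and raw[right_trim - 1] == " "` (index in range likewise)
def pvWhileRight (raw : List Char) (lt rt : Nat) : Nat :=
  if lt < rt ∧ raw.getD (rt - 1) ' ' = ' ' then pvWhileRight raw lt (rt - 1) else rt
termination_by rt
decreasing_by omega

def collapsed_text_with_offsets_py (text : String) : String × List Int :=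
  let r := pvALoop text.toList 0 false
  let raw := r.1
  if PySem.Str.strip (String.ofList raw) = "" then ("", [])
  else
    let lt := pvWhileLeft raw raw.length 0
    let rt := pvWhileRight raw lt raw.length
    (String.ofList (PySem.List.slice raw (some (lt : Int)) (some (rt : Int))),
     PySem.List.slice r.2 (some (lt : Int)) (some (rt : Int)))

-- ===== PORT B =====
-- Source B's outer while-loop: maximal non-whitespace runs with their start offsets
-- (the inner `while j < n and not text[j].isspace(): j += 1` scan is the takeWhile/dropWhile split)
def pvBWords (cs : List Char) (k : Int) : List (Int × List Char) :=
  match cs with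
  | [] => []
  | c :: rest =>
    if PySem.Chars.isspace c then pvBWords rest (k + 1)
    else
      let t := rest.takeWhile (fun x => !PySem.Chars.isspace x)
      (k, c :: t) :: pvBWords (rest.dropWhile (fun x => !PySem.Chars.isspace x)) (k + 1 + (t.length : Int))
termination_by cs.length
decreasing_by
  all_goals have := List.length_dropWhile_le (fun x => !PySem.Chars.isspace x) rest
  all_goals simp_all

-- `zip(w.lower(), range(start, end))`
def pvSeg (st : Int) (w : List Char) : List (Char × Int) :=
  (PySem.Chars.lower w).zip (PySem.List.pyRange st (st + (w.length : Int)) 1)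

-- Source B's for-loop over words carrying prev_end, building the (char, offset) pairs
def pvBBuild (ws : List (Int × List Char)) (prev : Option Int) : List (Char × Int) :=
  match ws with
  | [] => []
  | (st, w) :: rest =>
    let e := st + (w.length : Int)
    let seg := pvSeg st w
    let tail := pvBBuild rest (some e)
    match prev with
    | none => seg ++ tail
    | some p => (' ', p) :: (seg ++ tail)

def collapsed_text_with_offsets_py_alt (text : String) : String × List Int :=
  let ws := pvBWords text.toList 0
  if ws = [] then ("", [])
  else
    let pairs := pvBBuild ws none
    (String.ofList (pairs.map Prod.fst), pairs.map Prod.snd)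

-- ===== PRECONDITION & SPEC =====
def Spec_collapsed_text_with_offsets_py (text : String) (out : String × List Int) : Prop := out = collapsed_text_with_offsets_py_alt text
instance (text : String) (out : String × List Int) : Decidable (Spec_collapsed_text_with_offsets_py text out) := by unfold Spec_collapsed_text_with_offsets_py; infer_instance

-- ===== CLAIM (what is proved, stated in full; the proofs are below) =====
def Claim_equal_collapsed_text_with_offsets_py : Prop := ∀ (text : String), Dom_collapsed_text_with_offsets_py text → Spec_collapsed_text_with_offsets_py text (collapsed_text_with_offsets_py text)

-- ===== LEMMAS AND PROOFS =====

-- A's loop, zipped: same recursion producing (char, offset) pairs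
def pvAZip (cs : List Char) (k : Int) (s : Bool) : List (Char × Int) :=
  match cs with
  | [] => []
  | c :: rest =>
    if PySem.Chars.isspace c then
      if s then pvAZip rest (k + 1) s
      else (' ', k) :: pvAZip rest (k + 1) true
    else (PySem.Chars.lowerChar c, k) :: pvAZip rest (k + 1) false

-- drop a single trailing space pair
def pvDts : List (Char × Int) → List (Char × Int)
  | [] => []
  | [x] => if x.1 = ' ' then [] else [x]
  | x :: y :: r => x :: pvDts (y :: r)

def pvAttach : Option Int → List (Char × Int) → List (Char × Int)
  | none, l => l
  | some p, l => if l = [] then [] else (' ', p) :: l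

theorem pvALoop_eq (cs : List Char) (k : Int) (s : Bool) :
    pvALoop cs k s = ((pvAZip cs k s).map Prod.fst, (pvAZip cs k s).map Prod.snd) := by
  induction cs generalizing k s with
  | nil => simp [pvALoop, pvAZip]
  | cons c rest ih => by_cases h : PySem.Chars.isspace c <;> cases s <;> simp [pvALoop, pvAZip, h, ih]

theorem pv_isspace_false {c : Char} (h1 : 65 ≤ c.toNat) (h2 : c.toNat ≤ 122) :
    PySem.Chars.isspace c = false := by
  unfold PySem.Chars.isspace
  simp only [Bool.or_eq_false_iff, Bool.and_eq_false_iff, decide_eq_false_iff_not]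
  omega

theorem pv_sp_lowerChar (c : Char) :
    PySem.Chars.isspace (PySem.Chars.lowerChar c) = PySem.Chars.isspace c := by
  unfold PySem.Chars.lowerChar
  split
  · rename_i h
    unfold PySem.Chars.isupper at h
    simp at h
    obtain ⟨h1, h2⟩ := h
    have hA : (65:Nat) ≤ c.toNat := h1
    have hZ : c.toNat ≤ 90 := h2
    have hv : (c.toNat + 32).isValidChar := by left; omega
    have ht : (Char.ofNat (c.toNat + 32)).toNat = c.toNat + 32 := by
      rw [Char.toNat_ofNat, if_pos hv]
    rw [pv_isspace_false (by omega) (by omega), pv_isspace_false (by omega) (by omega)]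
  · rfl

theorem pv_ne_space {c : Char} (h : PySem.Chars.isspace c = false) : c ≠ ' ' := by
  intro he; subst he; simp [PySem.Chars.isspace] at h

theorem pvSeg_nil (st : Int) : pvSeg st [] = [] := by simp [pvSeg, PySem.Chars.lower]

theorem pvSeg_cons (st : Int) (c : Char) (t : List Char) :
    pvSeg st (c :: t) = (PySem.Chars.lowerChar c, st) :: pvSeg (st + 1) t := by
  unfold pvSeg
  have he : st + ((c :: t).length : Int) = (st + 1) + (t.length : Int) := by
    rw [List.length_cons]; push_cast; ring
  have h : st < st + ((c :: t).length : Int) := by simp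
  rw [PySem.List.pyRange_one_cons h, he]
  simp [PySem.Chars.lower]

theorem pvSeg_all_ne (st : Int) (w : List Char) (hw : ∀ x ∈ w, PySem.Chars.isspace x = false) :
    ∀ p ∈ pvSeg st w, p.1 ≠ ' ' := by
  induction w generalizing st with
  | nil => simp [pvSeg_nil]
  | cons c t ih =>
    rw [pvSeg_cons]
    intro p hp
    rcases List.mem_cons.mp hp with hp | hp
    · subst hp
      exact pv_ne_space (by rw [pv_sp_lowerChar]; exact hw c (by simp))
    · exact ih (st + 1) (fun x hx => hw x (by simp [hx])) p hp

theorem pvSeg_last (w : List Char) (st : Int) (hne : w ≠ [])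
    (hw : ∀ x ∈ w, PySem.Chars.isspace x = false) :
    ∃ l x, pvSeg st w = l ++ [x] ∧ PySem.Chars.isspace x.1 = false := by
  induction w generalizing st with
  | nil => exact absurd rfl hne
  | cons c t ih =>
    rw [pvSeg_cons]
    cases t with
    | nil =>
      exact ⟨[], (PySem.Chars.lowerChar c, st), by simp [pvSeg_nil],
        by rw [pv_sp_lowerChar]; exact hw c (by simp)⟩
    | cons c2 t2 =>
      obtain ⟨l, x, hlx, hx⟩ := ih (st + 1) (by simp) (fun x hx => hw x (by simp [hx]))
      exact ⟨(PySem.Chars.lowerChar c, st) :: l, x, by simp [hlx], hx⟩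

-- traversal through an all-non-space prefix
theorem pvAZip_word (t : List Char) (d : List Char) (k : Int)
    (ht : ∀ x ∈ t, PySem.Chars.isspace x = false) :
    pvAZip (t ++ d) k false = pvSeg k t ++ pvAZip d (k + (t.length : Int)) false := by
  induction t generalizing k with
  | nil => simp [pvSeg_nil]
  | cons c t ih =>
    have hc : PySem.Chars.isspace c = false := ht c (by simp)
    have he : k + ((c :: t).length : Int) = (k + 1) + (t.length : Int) := by rw [List.length_cons]; push_cast; ring
    rw [List.cons_append]
    show pvAZip (c :: (t ++ d)) k false = _
    rw [pvAZip, if_neg (by simp [hc]), pvSeg_cons, he]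
    simp only [List.cons_append, List.cons.injEq, true_and]
    exact ih (k + 1) (fun x hx => ht x (by simp [hx]))

-- first element emitted in state `true` is a word character
theorem pvAZip_head (cs : List Char) (k : Int) {y : Char × Int} {r : List (Char × Int)}
    (h : pvAZip cs k true = y :: r) : PySem.Chars.isspace y.1 = false := by
  induction cs generalizing k y r with
  | nil => simp [pvAZip] at h
  | cons c rest ih =>
    rw [pvAZip] at h
    by_cases hc : PySem.Chars.isspace c
    · rw [if_pos hc, if_pos rfl] at h
      exact ih (k + 1) h
    · rw [if_neg hc] at h
      obtain ⟨h1, -⟩ := List.cons.injEq .. ▸ h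
      rw [← h1]
      simp [pv_sp_lowerChar, hc]

theorem pvDts_append (xs : List (Char × Int)) {l : List (Char × Int)} (h : l ≠ []) :
    pvDts (xs ++ l) = xs ++ pvDts l := by
  induction xs with
  | nil => simp
  | cons x xs ih =>
    cases hx : xs ++ l with
    | nil =>
      rcases List.append_eq_nil_iff.mp hx with ⟨-, h2⟩
      exact absurd h2 h
    | cons y r =>
      rw [List.cons_append, hx, pvDts, ← hx, ih]
      simp

theorem pvDts_of_all_ne {l : List (Char × Int)} (h : ∀ x ∈ l, x.1 ≠ ' ') : pvDts l = l := by
  induction l with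
  | nil => rfl
  | cons x rest ih =>
    cases rest with
    | nil => simp [pvDts, h x (by simp)]
    | cons y r =>
      rw [pvDts, ih (fun z hz => h z (by simp [hz]))]

theorem pvDts_decomp (l : List (Char × Int)) :
    pvDts l = l ∨ ∃ l' i, l = l' ++ [(' ', i)] ∧ pvDts l = l' := by
  induction l with
  | nil => left; rfl
  | cons x rest ih =>
    cases rest with
    | nil =>
      by_cases hx : x.1 = ' '
      · right
        exact ⟨[], x.2, by cases x; simp_all, by simp [pvDts, hx]⟩
      · left; simp [pvDts, hx]
    | cons y r =>
      rw [pvDts]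
      rcases ih with ih | ⟨l', i, h1, h2⟩
      · left; rw [ih]
      · right
        exact ⟨x :: l', i, by simp [h1], by rw [h2]⟩

theorem pvBWords_nil (k : Int) : pvBWords [] k = [] := by rw [pvBWords]

theorem pvBWords_cons_sp {c : Char} (hc : PySem.Chars.isspace c = true) (rest : List Char) (k : Int) :
    pvBWords (c :: rest) k = pvBWords rest (k + 1) := by
  rw [pvBWords]; simp [hc]

theorem pvBWords_cons_word {c : Char} (hc : PySem.Chars.isspace c = false) (rest : List Char) (k : Int) :
    pvBWords (c :: rest) k =
      (k, c :: rest.takeWhile (fun x => !PySem.Chars.isspace x)) ::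
        pvBWords (rest.dropWhile (fun x => !PySem.Chars.isspace x))
          (k + 1 + ((rest.takeWhile (fun x => !PySem.Chars.isspace x)).length : Int)) := by
  rw [pvBWords]; simp [hc]

theorem pvAZip_cons_sp_true {c : Char} (hc : PySem.Chars.isspace c = true) (rest : List Char) (k : Int) :
    pvAZip (c :: rest) k true = pvAZip rest (k + 1) true := by
  rw [pvAZip]; simp [hc]

theorem pvAZip_cons_sp_false {c : Char} (hc : PySem.Chars.isspace c = true) (rest : List Char) (k : Int) :
    pvAZip (c :: rest) k false = (' ', k) :: pvAZip rest (k + 1) true := by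
  rw [pvAZip]; simp [hc]

theorem pvAZip_cons_word {c : Char} (hc : PySem.Chars.isspace c = false) (rest : List Char) (k : Int) (s : Bool) :
    pvAZip (c :: rest) k s = (PySem.Chars.lowerChar c, k) :: pvAZip rest (k + 1) false := by
  rw [pvAZip]; simp [hc]

theorem pvDts_cons_cons (x y : Char × Int) (r : List (Char × Int)) :
    pvDts (x :: y :: r) = x :: pvDts (y :: r) := by rw [pvDts]

theorem pv_dropWhile_head {p : Char → Bool} : ∀ (l : List Char) {s : Char} {d2 : List Char},
    l.dropWhile p = s :: d2 → p s = false := by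
  intro l
  induction l with
  | nil => intro s d2 h; simp at h
  | cons y t ih =>
    intro s d2 h
    by_cases hy : p y
    · rw [List.dropWhile_cons_of_pos hy] at h; exact ih h
    · rw [List.dropWhile_cons_of_neg hy] at h
      obtain ⟨h1, -⟩ := List.cons.injEq .. ▸ h
      rw [← h1]; simpa using hy

theorem pvAttach_of_ne {prev : Option Int} {l : List (Char × Int)} (h : l ≠ []) :
    pvAttach prev l = (match prev with | none => [] | some p => [(' ', p)]) ++ l := by
  cases prev <;> simp [pvAttach, h]

theorem pvBBuild_cons (st : Int) (w : List Char) (ws : List (Int × List Char)) (prev : Option Int) :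
    pvBBuild ((st, w) :: ws) prev =
      (match prev with | none => [] | some p => [(' ', p)]) ++
        (pvSeg st w ++ pvBBuild ws (some (st + (w.length : Int)))) := by
  cases prev <;> simp [pvBBuild]

-- the central correspondence: B's build over B's words is A's collapsed stream,
-- with the final trailing space dropped and the pending separator attached
theorem pvMain (n : Nat) : ∀ (cs : List Char), cs.length ≤ n → ∀ (k : Int) (prev : Option Int),
    pvBBuild (pvBWords cs k) prev = pvAttach prev (pvDts (pvAZip cs k true)) := by
  induction n with
  | zero =>
    intro cs hl k prev
    have : cs = [] := List.eq_nil_of_length_eq_zero (by omega)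
    subst this
    rw [pvBWords_nil]
    cases prev <;> simp [pvBBuild, pvAZip, pvDts, pvAttach]
  | succ n ih =>
    intro cs hl k prev
    cases cs with
    | nil =>
      rw [pvBWords_nil]
      cases prev <;> simp [pvBBuild, pvAZip, pvDts, pvAttach]
    | cons c rest =>
      by_cases hc : PySem.Chars.isspace c
      · rw [pvBWords_cons_sp hc, pvAZip_cons_sp_true hc]
        exact ih rest (by simp at hl; omega) (k + 1) prev
      · rw [Bool.not_eq_true] at hc
        set t := rest.takeWhile (fun x => !PySem.Chars.isspace x) with htdef
        set d := rest.dropWhile (fun x => !PySem.Chars.isspace x) with hddef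
        have ht : ∀ x ∈ t, PySem.Chars.isspace x = false := by
          intro x hx
          have := List.mem_takeWhile_imp hx
          simpa using this
        have hrest : t ++ d = rest := List.takeWhile_append_dropWhile
        have hWne : ∀ p ∈ pvSeg k (c :: t), p.1 ≠ ' ' := by
          apply pvSeg_all_ne
          intro x hx
          rcases List.mem_cons.mp hx with hx | hx
          · subst hx; exact hc
          · exact ht x hx
        have hWcons : pvSeg k (c :: t) ≠ [] := by rw [pvSeg_cons]; simp
        have he2 : k + (((c :: t).length) : Int) = k + 1 + (t.length : Int) := by
          rw [List.length_cons]; push_cast; ring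
        have hz : pvAZip (c :: rest) k true =
            pvSeg k (c :: t) ++ pvAZip d (k + 1 + (t.length : Int)) false := by
          rw [pvAZip_cons_word hc, ← hrest, pvAZip_word t d (k + 1) ht, pvSeg_cons]
          simp
        rw [pvBWords_cons_word hc, pvBBuild_cons, ← htdef, ← hddef, he2, hz]
        cases hd : d with
        | nil =>
          rw [pvBWords_nil]
          have hid : pvDts (pvSeg k (c :: t) ++ pvAZip [] (k + 1 + (t.length : Int)) false) =
              pvSeg k (c :: t) := by
            simp only [pvAZip, List.append_nil]
            exact pvDts_of_all_ne hWne
          rw [hid, pvAttach_of_ne hWcons]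
          simp [pvBBuild]
        | cons s d2 =>
          have hs : PySem.Chars.isspace s = true := by
            have := pv_dropWhile_head rest (hddef ▸ hd)
            simpa using this
          rw [pvAZip_cons_sp_false hs, pvBWords_cons_sp hs]
          have hlen : d2.length ≤ n := by
            have h1 : d.length ≤ rest.length := hddef ▸ List.length_dropWhile_le _ rest
            rw [hd] at h1
            simp at hl h1
            omega
          rw [ih d2 hlen (k + 1 + (t.length : Int) + 1) (some (k + 1 + (t.length : Int)))]
          cases hL : pvAZip d2 (k + 1 + (t.length : Int) + 1) true with
          | nil =>
            have hdts : pvDts (pvSeg k (c :: t) ++ [(' ', k + 1 + (t.length : Int))]) =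
                pvSeg k (c :: t) := by
              rw [pvDts_append _ (by simp)]
              simp [pvDts]
            rw [hdts, pvAttach_of_ne hWcons]
            simp [pvDts, pvAttach]
          | cons y L2 =>
            have hy : y.1 ≠ ' ' := pv_ne_space (pvAZip_head d2 _ hL)
            have hdtsne : pvDts (y :: L2) ≠ [] := by
              cases L2 with
              | nil => simp [pvDts, hy]
              | cons z r => rw [pvDts_cons_cons]; simp
            have hstep : pvDts ((' ', k + 1 + (t.length : Int)) :: y :: L2) =
                (' ', k + 1 + (t.length : Int)) :: pvDts (y :: L2) := pvDts_cons_cons _ _ _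
            rw [pvAttach_of_ne hdtsne,
              pvDts_append _ (l := (' ', k + 1 + (t.length : Int)) :: y :: L2) (by simp), hstep,
              pvAttach_of_ne (by simp [hWcons] : pvSeg k (c :: t) ++ (' ', k + 1 + (t.length : Int)) :: pvDts (y :: L2) ≠ [])]
            simp


theorem pvBWords_shape (n : Nat) : ∀ (cs : List Char), cs.length ≤ n → ∀ (k : Int),
    ∀ p ∈ pvBWords cs k, p.2 ≠ [] ∧ ∀ x ∈ p.2, PySem.Chars.isspace x = false := by
  induction n with
  | zero =>
    intro cs hlen k p hp
    have : cs = [] := List.eq_nil_of_length_eq_zero (by omega)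
    subst this; simp [pvBWords] at hp
  | succ n ih =>
    intro cs hlen k p hp
    cases cs with
    | nil => simp [pvBWords] at hp
    | cons c rest =>
      rw [pvBWords] at hp
      by_cases hc : PySem.Chars.isspace c
      · rw [if_pos hc] at hp
        exact ih rest (by simp at hlen; omega) (k + 1) p hp
      · rw [if_neg hc] at hp
        rcases List.mem_cons.mp hp with hp | hp
        · subst hp
          refine ⟨by simp, ?_⟩
          intro x hx
          rcases List.mem_cons.mp hx with hx | hx
          · subst hx; simpa using hc
          · have := List.mem_takeWhile_imp hx
            simpa using this
        · have hd := List.length_dropWhile_le (fun x => !PySem.Chars.isspace x) rest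
          exact ih _ (by simp at hlen; omega) _ p hp

theorem pvBBuild_last (ws : List (Int × List Char)) (prev : Option Int) (hne : ws ≠ [])
    (hs : ∀ p ∈ ws, p.2 ≠ [] ∧ ∀ x ∈ p.2, PySem.Chars.isspace x = false) :
    ∃ l x, pvBBuild ws prev = l ++ [x] ∧ PySem.Chars.isspace x.1 = false := by
  induction ws generalizing prev with
  | nil => exact absurd rfl hne
  | cons hw ws ih =>
    obtain ⟨st, w⟩ := hw
    obtain ⟨hwne, hwsp⟩ := hs (st, w) (by simp)
    cases ws with
    | nil =>
      obtain ⟨l, x, hlx, hx⟩ := pvSeg_last w st hwne hwsp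
      cases prev with
      | none =>
        exact ⟨l, x, by simp [pvBBuild, hlx], hx⟩
      | some p =>
        exact ⟨(' ', p) :: l, x, by simp [pvBBuild, hlx], hx⟩
    | cons w2 ws2 =>
      obtain ⟨l, x, hlx, hx⟩ := ih (some (st + (w.length : Int)))
        (by simp) (fun q hq => hs q (by simp [hq]))
      cases prev with
      | none =>
        exact ⟨pvSeg st w ++ l, x, by rw [pvBBuild_cons, hlx]; simp, hx⟩
      | some p =>
        exact ⟨(' ', p) :: (pvSeg st w ++ l), x, by rw [pvBBuild_cons, hlx]; simp, hx⟩

theorem pvBBuild_head (ws : List (Int × List Char)) (hne : ws ≠ [])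
    (hs : ∀ p ∈ ws, p.2 ≠ [] ∧ ∀ x ∈ p.2, PySem.Chars.isspace x = false) :
    ∃ x r, pvBBuild ws none = x :: r ∧ PySem.Chars.isspace x.1 = false := by
  cases ws with
  | nil => exact absurd rfl hne
  | cons hw ws =>
    obtain ⟨st, w⟩ := hw
    obtain ⟨hwne, hwsp⟩ := hs (st, w) (by simp)
    obtain ⟨c, t, hct⟩ := List.exists_cons_of_ne_nil hwne
    subst hct
    refine ⟨(PySem.Chars.lowerChar c, st),
      pvSeg (st + 1) t ++ pvBBuild ws (some (st + (((c :: t).length) : Int))), ?_, ?_⟩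
    · rw [pvBBuild_cons, pvSeg_cons]; simp
    · rw [pv_sp_lowerChar]; exact hwsp c (by simp)

theorem pv_getD_append_cons (xs : List Char) (a : Char) (ys : List Char) :
    (xs ++ a :: ys).getD xs.length ' ' = a := by
  simp [List.getD]

theorem pv_strip_ne {l : List Char} {c : Char} (hc : c ∈ l)
    (hs : PySem.Chars.isspace c = false) : ¬ (PySem.Str.strip (String.ofList l) = "") := by
  intro h
  have h2 : PySem.Chars.strip l = [] := by
    have := congrArg String.toList h
    simpa [PySem.Str.toList_strip] using this
  have hmem : c ∈ l.dropWhile PySem.Chars.isspace := by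
    clear h h2
    induction l with
    | nil => simp at hc
    | cons y t ih =>
      by_cases hy : PySem.Chars.isspace y
      · rcases List.mem_cons.mp hc with hcy | hct
        · subst hcy; rw [hy] at hs; exact absurd hs (by simp)
        · rw [List.dropWhile_cons_of_pos hy]; exact ih hct
      · rw [List.dropWhile_cons_of_neg hy]; exact hc
  unfold PySem.Chars.strip PySem.Chars.rstrip PySem.Chars.lstrip at h2
  have h3 : (List.dropWhile PySem.Chars.isspace (l.dropWhile PySem.Chars.isspace).reverse) = [] := by
    simpa using h2
  have h4 := List.dropWhile_eq_nil_iff.mp h3 c (by simp [hmem])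
  rw [hs] at h4; simp at h4

theorem pvWhileLeft_spec (Lz pairs Tz : List (Char × Int)) (x0 : Char × Int)
    (r0 : List (Char × Int))
    (hL : Lz = [] ∨ ∃ i, Lz = [(' ', i)]) (hp1 : pairs = x0 :: r0) (hx0 : x0.1 ≠ ' ') :
    pvWhileLeft ((Lz ++ pairs ++ Tz).map Prod.fst) ((Lz ++ pairs ++ Tz).map Prod.fst).length 0 =
      Lz.length := by
  subst hp1
  rcases hL with hL | ⟨i, hL⟩ <;> subst hL
  · rw [pvWhileLeft, if_neg]
    · simp
    · rintro ⟨-, h2⟩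
      simp [List.getD] at h2
      exact hx0 h2
  · rw [pvWhileLeft, if_pos, pvWhileLeft, if_neg]
    · simp
    · rintro ⟨-, h2⟩
      simp [List.getD] at h2
      exact hx0 h2
    · exact ⟨by simp, by simp [List.getD]⟩

theorem pvWhileRight_spec (Lz pairs Tz : List (Char × Int)) (ll : List (Char × Int))
    (xl : Char × Int)
    (hT : Tz = [] ∨ ∃ i, Tz = [(' ', i)]) (hp2 : pairs = ll ++ [xl]) (hxl : xl.1 ≠ ' ') :
    pvWhileRight ((Lz ++ pairs ++ Tz).map Prod.fst) Lz.length ((Lz ++ pairs ++ Tz).map Prod.fst).length =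
      Lz.length + pairs.length := by
  subst hp2
  rcases hT with hT | ⟨i, hT⟩ <;> subst hT
  · -- no trailing space
    have hshape : (Lz ++ (ll ++ [xl]) ++ []).map Prod.fst =
        (Lz ++ ll).map Prod.fst ++ xl.1 :: [] := by simp
    rw [pvWhileRight, if_neg]
    · simp
    · rintro ⟨-, h2⟩
      rw [hshape] at h2
      have hlen : ((Lz ++ ll).map Prod.fst ++ xl.1 :: []).length - 1 =
          ((Lz ++ ll).map Prod.fst).length := by simp
      rw [hlen, pv_getD_append_cons] at h2
      exact hxl h2
  · -- one trailing space
    have hshape : (Lz ++ (ll ++ [xl]) ++ [(' ', i)]).map Prod.fst =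
        (Lz ++ (ll ++ [xl])).map Prod.fst ++ ' ' :: [] := by simp
    have hshape2 : (Lz ++ (ll ++ [xl]) ++ [(' ', i)]).map Prod.fst =
        (Lz ++ ll).map Prod.fst ++ xl.1 :: (' ' :: []) := by simp
    rw [pvWhileRight, if_pos, pvWhileRight, if_neg]
    · simp
    · rintro ⟨-, h2⟩
      have hlen : ((Lz ++ (ll ++ [xl]) ++ [(' ', i)]).map Prod.fst).length - 1 - 1 =
          ((Lz ++ ll).map Prod.fst).length := by simp
      rw [hlen, hshape2, pv_getD_append_cons] at h2
      exact hxl h2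
    · constructor
      · simp
      · have hlen : ((Lz ++ (ll ++ [xl]) ++ [(' ', i)]).map Prod.fst).length - 1 =
            ((Lz ++ (ll ++ [xl])).map Prod.fst).length := by simp
        rw [hlen, hshape, pv_getD_append_cons]

-- ===== VERDICT (by name: the statement is the Claim_ definition above) =====
theorem collapsed_text_with_offsets_py_spec : Claim_equal_collapsed_text_with_offsets_py := by
  intro text hdom
  unfold Spec_collapsed_text_with_offsets_py
  unfold collapsed_text_with_offsets_py collapsed_text_with_offsets_py_alt
  rw [pvALoop_eq]
  by_cases hw : pvBWords text.toList 0 = []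
  · -- no words: both sides return ("", [])
    rw [if_pos hw]
    have hmain := pvMain text.toList.length text.toList (le_refl _) 0 none
    rw [hw] at hmain
    have hdts : pvDts (pvAZip text.toList 0 true) = [] := by
      simpa [pvBBuild, pvAttach] using hmain.symm
    have hT : pvAZip text.toList 0 true = [] := by
      rcases pvDts_decomp (pvAZip text.toList 0 true) with h | ⟨l', i, h1, h2⟩
      · rw [← h, hdts]
      · rw [hdts] at h2; subst h2
        have := pvAZip_head text.toList 0 (by simpa using h1)
        simp [PySem.Chars.isspace] at this
    cases hcs : text.toList with
    | nil =>
      simp [pvAZip]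
      intro h
      exact absurd (by decide) h
    | cons c rest =>
      by_cases hc : PySem.Chars.isspace c
      · rw [pvAZip_cons_sp_false hc]
        rw [hcs, pvAZip_cons_sp_true hc] at hT
        rw [hT]
        simp
        intro h
        exact absurd (by decide) h
      · rw [Bool.not_eq_true] at hc
        rw [hcs, pvAZip_cons_word hc] at hT
        simp at hT
  · -- at least one word
    rw [if_neg hw]
    have hshape := pvBWords_shape text.toList.length text.toList (le_refl _) 0
    have hmain := pvMain text.toList.length text.toList (le_refl _) 0 none
    have hpairs : pvBBuild (pvBWords text.toList 0) none = pvDts (pvAZip text.toList 0 true) := by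
      simpa [pvAttach] using hmain
    obtain ⟨x0, r0, hhead, hx0sp⟩ := pvBBuild_head _ hw hshape
    obtain ⟨ll, xl, hlast, hxlsp⟩ := pvBBuild_last _ none hw hshape
    set pairs := pvBBuild (pvBWords text.toList 0) none with hpairsdef
    have hx0 : x0.1 ≠ ' ' := pv_ne_space hx0sp
    have hxl : xl.1 ≠ ' ' := pv_ne_space hxlsp
    -- trailing decomposition of the state-true stream
    have hTz : ∃ Tz, (Tz = [] ∨ ∃ i, Tz = [(' ', i)]) ∧
        pvAZip text.toList 0 true = pairs ++ Tz := by
      rcases pvDts_decomp (pvAZip text.toList 0 true) with h | ⟨l', i, h1, h2⟩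
      · exact ⟨[], Or.inl rfl, by rw [hpairs, h]; simp⟩
      · exact ⟨[(' ', i)], Or.inr ⟨i, rfl⟩, by rw [h1, hpairs, h2]⟩
    obtain ⟨Tz, hTzs, hTzeq⟩ := hTz
    -- leading decomposition of the state-false stream
    have hLz : ∃ Lz, (Lz = [] ∨ ∃ i, Lz = [(' ', i)]) ∧
        pvAZip text.toList 0 false = Lz ++ pairs ++ Tz := by
      cases hcs : text.toList with
      | nil => rw [hcs, pvBWords_nil] at hw; exact absurd rfl hw
      | cons c rest =>
        by_cases hc : PySem.Chars.isspace c
        · refine ⟨[(' ', 0)], Or.inr ⟨0, rfl⟩, ?_⟩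
          rw [pvAZip_cons_sp_false hc]
          rw [hcs, pvAZip_cons_sp_true hc] at hTzeq
          rw [hTzeq]; simp
        · rw [Bool.not_eq_true] at hc
          refine ⟨[], Or.inl rfl, ?_⟩
          rw [pvAZip_cons_word hc]
          rw [hcs, pvAZip_cons_word hc] at hTzeq
          rw [hTzeq]; simp
    obtain ⟨Lz, hLzs, hLzeq⟩ := hLz
    rw [hLzeq]
    -- the raw string has a non-space character, so raw.strip() is non-empty
    have hmem : x0.1 ∈ (Lz ++ pairs ++ Tz).map Prod.fst := by
      rw [hhead]; simp
    rw [if_neg (pv_strip_ne hmem hx0sp)]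
    have hsl : ∀ {α : Type} (f : Char × Int → α),
        PySem.List.slice ((Lz ++ pairs ++ Tz).map f) (some (Lz.length : Int))
          (some ((Lz.length + pairs.length : Nat) : Int)) = pairs.map f := by
      intro α f
      have h0 : ((Lz ++ pairs ++ Tz).map f) = Lz.map f ++ (pairs.map f ++ Tz.map f) := by simp
      rw [h0, PySem.List.slice_natCast]
      have h1 : (Lz.map f).length = Lz.length := by simp
      rw [← h1, List.drop_left]
      have h2 : (Lz.map f).length + pairs.length - (Lz.map f).length = (pairs.map f).length := by
        simp
      rw [h2, List.take_left]
    simp only [pvWhileLeft_spec Lz pairs Tz x0 r0 hLzs hhead hx0,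
               pvWhileRight_spec Lz pairs Tz ll xl hTzs hlast hxl,
               hsl Prod.fst, hsl Prod.snd]
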